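-- pv_equiv track=rewrite | github.com/Thijmer/molarmass | molarmass.py | separate_formula
-- ===== SOURCE A (Python) =====
-- def separate_formula(formula):
--     elements = []
--     curr_element = ""
--     for letter in formula:
--         if letter.isupper():
--             elements.append(curr_element)
--             curr_element = letter
--         else:
--             curr_element += letter
--     elements.append(curr_element)
--     elements = [x for x in elements if len(x) > 0]
--     return elements
-- ===== SOURCE B (Python) =====
-- def separate_formula(formula):
--     # Two-phase index-then-slice: first collect all uppercase boundary
--     # positions, then cut the string between adjacent boundaries, skipping
--     # empty slices (which only arise before a leading uppercase letter).
--     cuts = [i for i, c in enumerate(formula) if c.isupper()] + [len(formula)]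
--     return [formula[a:b] for a, b in zip([0] + cuts, cuts) if a < b]
-- ===== Notes on version B (the rewrite author's own statement) =====
-- stated objective: alternative
-- what changed: B replaces A's single-pass running-accumulator loop (append on uppercase, then filter empties) by a two-phase index-then-slice traversal: it first collects all uppercase boundary indices, then slices the string between adjacent boundaries, skipping empty slices.
import Mathlib
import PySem

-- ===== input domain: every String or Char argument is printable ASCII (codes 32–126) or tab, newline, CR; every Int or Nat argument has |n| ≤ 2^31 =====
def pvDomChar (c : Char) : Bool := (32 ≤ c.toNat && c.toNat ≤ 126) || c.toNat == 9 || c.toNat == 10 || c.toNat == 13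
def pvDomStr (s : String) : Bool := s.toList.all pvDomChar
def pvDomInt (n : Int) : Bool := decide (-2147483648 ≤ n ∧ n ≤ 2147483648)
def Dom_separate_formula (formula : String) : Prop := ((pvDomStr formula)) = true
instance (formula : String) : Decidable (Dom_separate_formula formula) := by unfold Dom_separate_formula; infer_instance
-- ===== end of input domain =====

-- B replaces A's running-accumulator loop with a two-phase index-then-slice traversal
-- (objective: alternative decomposition, same cost).

-- ===== PORT A =====
-- strings handled as List Char (String.mk at the end); the fold state is (elements, curr_element)
def sfStepA (s : List (List Char) × List Char) (c : Char) : List (List Char) × List Char :=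
  if PySem.Chars.isupper c then (s.1 ++ [s.2], [c]) else (s.1, s.2 ++ [c])

def separate_formula (formula : String) : List String :=
  let st := formula.toList.foldl sfStepA ([], [])
  (((st.1 ++ [st.2]).filter (fun x => decide (0 < x.length))).map (fun l => String.mk l))

-- ===== PORT B =====
-- the comprehension '[i for i, c in enumerate(formula) if c.isupper()]' as a recursion with a counter
def sfCuts (i : Nat) : List Char → List Nat
  | [] => []
  | c :: cs => if PySem.Chars.isupper c then i :: sfCuts (i + 1) cs else sfCuts (i + 1) cs

-- formula[a:b] with 0 ≤ a ≤ b ≤ len is exactly (drop a).take (b - a)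
def separate_formula_alt (formula : String) : List String :=
  let cs := formula.toList
  let cuts := sfCuts 0 cs ++ [cs.length]
  ((List.zip (0 :: cuts) cuts).filter (fun p => decide (p.1 < p.2))).map
    (fun p => String.mk ((cs.drop p.1).take (p.2 - p.1)))

-- ===== PRECONDITION & SPEC =====
def Spec_separate_formula (formula : String) (out : List String) : Prop := out = separate_formula_alt formula
instance (formula : String) (out : List String) : Decidable (Spec_separate_formula formula out) := by unfold Spec_separate_formula; infer_instance

-- ===== CLAIM (what is proved, stated in full; the proofs are below) =====
def Claim_equal_separate_formula : Prop := ∀ (formula : String), Dom_separate_formula formula → Spec_separate_formula formula (separate_formula formula)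

-- ===== LEMMAS AND PROOFS =====

-- reference chunking: the chunks still to be produced given the pending chunk `curr`
def sfH (curr : List Char) : List Char → List (List Char)
  | [] => if curr = [] then [] else [curr]
  | c :: cs =>
      if PySem.Chars.isupper c then (if curr = [] then [] else [curr]) ++ sfH [c] cs
      else sfH (curr ++ [c]) cs

theorem sfA_eq_sfH (cs : List Char) : ∀ (els : List (List Char)) (curr : List Char),
    (((List.foldl sfStepA (els, curr) cs).1 ++ [(List.foldl sfStepA (els, curr) cs).2]).filter
        (fun x => decide (0 < x.length)))
      = els.filter (fun x => decide (0 < x.length)) ++ sfH curr cs := by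
  induction cs with
  | nil =>
      intro els curr
      simp only [List.foldl_nil, List.filter_append, sfH]
      rcases curr with _ | ⟨c, cur⟩ <;> simp
  | cons c cs ih =>
      intro els curr
      simp only [List.foldl_cons, sfStepA, sfH]
      by_cases h : PySem.Chars.isupper c = true
      · simp only [h, if_pos]
        rw [ih]
        simp only [List.filter_append, List.append_assoc]
        rcases curr with _ | ⟨d, cur⟩ <;> simp
      · simp only [h, if_neg, Bool.false_eq_true, not_false_iff]
        rw [ih]

-- adjacent pairs of (a :: l), i.e. what zip (a :: l) l produces
def sfAp (a : Nat) : List Nat → List (Nat × Nat)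
  | [] => []
  | b :: l => (a, b) :: sfAp b l

theorem zip_cons_self (a : Nat) (l : List Nat) : List.zip (a :: l) l = sfAp a l := by
  induction l generalizing a with
  | nil => simp [sfAp]
  | cons b l ih => simp [sfAp, List.zip_cons_cons, ih]

theorem sfCuts_shift (cs : List Char) : ∀ i : Nat, sfCuts i cs = (sfCuts 0 cs).map (· + i) := by
  induction cs with
  | nil => intro i; simp [sfCuts]
  | cons c cs ih =>
      intro i
      simp only [sfCuts]
      by_cases h : PySem.Chars.isupper c = true <;>
        (simp [h, ih (i + 1), ih 1, List.map_map, Function.comp_def]; intro a _; omega)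

-- the segment extractor
def sfSeg (cs : List Char) (p : Nat × Nat) : List Char := (cs.drop p.1).take (p.2 - p.1)

theorem sfSeg_shift (p rest : List Char) (a b : Nat) :
    sfSeg (p ++ rest) (a + p.length, b + p.length) = sfSeg rest (a, b) := by
  simp only [sfSeg]
  rw [show a + p.length = p.length + a by omega, List.drop_append]
  simp only [Nat.add_sub_cancel_left]
  congr 1
  · omega
  · simp [List.drop_of_length_le]

theorem sfAp_shift (l : List Nat) : ∀ (a : Nat) (p rest : List Char),
    ((sfAp (a + p.length) (l.map (· + p.length))).filter (fun q => decide (q.1 < q.2))).map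
        (sfSeg (p ++ rest))
      = ((sfAp a l).filter (fun q => decide (q.1 < q.2))).map (sfSeg rest) := by
  induction l with
  | nil => intro a p rest; simp [sfAp]
  | cons b l ih =>
      intro a p rest
      have hiff : (a + p.length < b + p.length) ↔ a < b := by omega
      by_cases hab : a < b <;>
        simp [sfAp, hiff, hab, sfSeg_shift, ih b p rest]

theorem sfB_main (cs : List Char) : ∀ (p : List Char),
    ((sfAp 0 ((sfCuts 0 cs).map (· + p.length) ++ [p.length + cs.length])).filter
        (fun q => decide (q.1 < q.2))).map (sfSeg (p ++ cs))
      = sfH p cs := by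
  induction cs with
  | nil =>
      intro p
      rcases p with _ | ⟨c, p'⟩
      · simp [sfCuts, sfAp, sfH]
      · simp [sfCuts, sfAp, sfH, sfSeg]
  | cons c cs ih =>
      intro p
      by_cases h : PySem.Chars.isupper c = true
      · -- uppercase: boundary at p.length, then recurse with pending [c]
        have hc : sfCuts 0 (c :: cs) = 0 :: (sfCuts 0 cs).map (· + 1) := by
          simp [sfCuts, h, sfCuts_shift cs 1]
        have hL : (0 :: (sfCuts 0 cs).map (· + 1)).map (· + p.length) ++ [p.length + (c :: cs).length]
            = (0 + p.length) :: ((sfCuts 0 cs).map (· + 1) ++ [1 + cs.length]).map (· + p.length) := by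
          have h2 : p.length + (c :: cs).length = 1 + cs.length + p.length := by
            simp only [List.length_cons]; omega
          simp only [List.map_cons, List.map_append, List.map_map, List.map_nil,
            Function.comp_def, List.cons_append, h2]
        have hIH := ih [c]
        have hIH' : ((sfAp 0 ((sfCuts 0 cs).map (· + 1) ++ [1 + cs.length])).filter
            (fun q => decide (q.1 < q.2))).map (sfSeg (c :: cs)) = sfH [c] cs := by
          rw [← hIH]
          simp only [List.length_cons, List.length_nil, Nat.zero_add, List.singleton_append]
        rw [hc, hL]
        simp only [sfAp, List.filter_cons]
        rw [show sfH p (c :: cs) = (if p = [] then [] else [p]) ++ sfH [c] cs by simp [sfH, h]]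
        by_cases hp : p = []
        · subst hp
          rw [if_neg (by simp)]
          rw [sfAp_shift ((sfCuts 0 cs).map (· + 1) ++ [1 + cs.length]) 0 [] (c :: cs), hIH']
          simp
        · rw [if_pos (by simp [List.length_pos_of_ne_nil hp])]
          rw [List.map_cons,
            sfAp_shift ((sfCuts 0 cs).map (· + 1) ++ [1 + cs.length]) 0 p (c :: cs), hIH']
          have hhead : sfSeg (p ++ c :: cs) (0, 0 + p.length) = p := by
            simp only [sfSeg, Nat.zero_add, Nat.sub_zero, List.drop_zero]
            exact List.take_left
          rw [hhead]
          simp [hp]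
      · -- lowercase: the boundary moves into the pending chunk p ++ [c]
        have hc : sfCuts 0 (c :: cs) = (sfCuts 0 cs).map (· + 1) := by
          simp [sfCuts, h, sfCuts_shift cs 1]
        have hIH := ih (p ++ [c])
        have hre : (sfCuts 0 cs).map (· + (p ++ [c]).length) ++ [(p ++ [c]).length + cs.length]
              = ((sfCuts 0 cs).map (· + 1)).map (· + p.length) ++ [p.length + (c :: cs).length] := by
          have h1 : (sfCuts 0 cs).map (· + (p ++ [c]).length)
              = ((sfCuts 0 cs).map (· + 1)).map (· + p.length) := by
            simp only [List.map_map, Function.comp_def]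
            exact List.map_congr_left (fun x _ => by
              simp only [List.length_append, List.length_cons, List.length_nil]; omega)
          have h2 : (p ++ [c]).length + cs.length = p.length + (c :: cs).length := by
            simp only [List.length_append, List.length_cons, List.length_nil]; omega
          rw [h1, h2]
        rw [hc, show p ++ c :: cs = (p ++ [c]) ++ cs by simp, ← hre, hIH]
        simp [sfH, h]

-- ===== VERDICT (by name: the statement is the Claim_ definition above) =====
theorem separate_formula_spec : Claim_equal_separate_formula := by
  intro formula _
  show separate_formula formula = separate_formula_alt formula
  have hA := sfA_eq_sfH formula.toList [] []
  simp only [List.filter_nil, List.nil_append] at hA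
  have hB := sfB_main formula.toList []
  have hz : (sfCuts 0 formula.toList).map (· + List.length ([] : List Char))
      ++ [List.length ([] : List Char) + formula.toList.length]
      = sfCuts 0 formula.toList ++ [formula.toList.length] := by
    simp
  rw [hz, List.nil_append] at hB
  simp only [separate_formula, separate_formula_alt, zip_cons_self]
  rw [hA, ← hB]
  simp [List.map_map, Function.comp_def, sfSeg]
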